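-- pv_equiv track=rewrite | github.com/hrakaroo/chess-openings | evaluate.py | state_to_fen
-- ===== SOURCE A (Python) =====
-- def state_to_fen(state):
--     """Convert state string to FEN notation."""
--     if state == 'start[w]':
--         return 'rnbqkbnr/pppppppp/8/8/8/8/PPPPPPPP/RNBQKBNR w KQkq - 0 1'
--
--     # Extract encoding and turn
--     bracket_index = state.index('[')
--     encoding = state[:bracket_index]
--     turn = state[bracket_index+1]  # 'w' or 'b'
--
--     # Piece mapping
--     piece_map = {
--         'A': 'P', 'B': 'N', 'C': 'B', 'D': 'R', 'E': 'Q', 'F': 'K',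
--         'G': 'p', 'H': 'n', 'I': 'b', 'J': 'r', 'K': 'q', 'L': 'k'
--     }
--
--     # Decode to 64 squares
--     squares = []
--     i = 0
--     while i < len(encoding):
--         char = encoding[i]
--         if char.isdigit():
--             # Empty squares
--             count = int(char)
--             squares.extend([None] * count)
--         else:
--             # Piece
--             squares.append(piece_map.get(char, '?'))
--         i += 1
--
--     # Build FEN board string (rank 8 to rank 1)
--     fen_parts = []
--     for rank in range(8):
--         rank_str = ''
--         empty_count = 0
--
--         for file in range(8):
--             square_index = rank * 8 + file
--             piece = squares[square_index] if square_index < len(squares) else None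
--
--             if piece is None:
--                 empty_count += 1
--             else:
--                 if empty_count > 0:
--                     rank_str += str(empty_count)
--                     empty_count = 0
--                 rank_str += piece
--
--         if empty_count > 0:
--             rank_str += str(empty_count)
--
--         fen_parts.append(rank_str)
--
--     fen_board = '/'.join(fen_parts)
--     fen_turn = 'w' if turn == 'w' else 'b'
--
--     # Simplified FEN (no castling, en passant tracking)
--     return f"{fen_board} {fen_turn} - - 0 1"
-- ===== SOURCE B (Python) =====
-- def state_to_fen(state):
--     """Convert state string to FEN notation (single streaming pass over the encoding)."""
--     if state == 'start[w]':
--         return 'rnbqkbnr/pppppppp/8/8/8/8/PPPPPPPP/RNBQKBNR w KQkq - 0 1'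
--
--     # Extract encoding and turn (verbatim parsing)
--     bracket_index = state.index('[')
--     encoding = state[:bracket_index]
--     turn = state[bracket_index + 1]  # 'w' or 'b'
--
--     piece_map = {
--         'A': 'P', 'B': 'N', 'C': 'B', 'D': 'R', 'E': 'Q', 'F': 'K',
--         'G': 'p', 'H': 'n', 'I': 'b', 'J': 'r', 'K': 'q', 'L': 'k'
--     }
--
--     out = []      # board characters
--     sq = 0        # squares emitted so far (0..64)
--     empties = 0   # pending empty squares in the current rank
--
--     def emit(piece):
--         nonlocal sq, empties
--         if sq >= 64:
--             return  # encodings longer than 64 squares: extra squares are ignored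
--         if piece is None:
--             empties += 1
--         else:
--             if empties > 0:
--                 out.append(str(empties))
--                 empties = 0
--             out.append(piece)
--         sq += 1
--         if sq % 8 == 0:  # rank boundary: flush pending empties, add separator
--             if empties > 0:
--                 out.append(str(empties))
--                 empties = 0
--             if sq < 64:
--                 out.append('/')
--
--     for ch in encoding:
--         if ch.isdigit():
--             for _ in range(int(ch)):
--                 emit(None)
--         else:
--             emit(piece_map.get(ch, '?'))
--     while sq < 64:  # short encodings: pad the rest of the board as empty
--         emit(None)
--
--     fen_turn = 'w' if turn == 'w' else 'b'
--     return f"{''.join(out)} {fen_turn} - - 0 1"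
-- ===== Notes on version B (the rewrite author's own statement) =====
-- stated objective: alternative
-- what changed: A decodes the encoding into a flat 64-slot square list and then re-scans it with nested rank/file loops recounting empties; B makes a single streaming pass over the encoding, emitting board characters directly while threading a running square index and a pending-empties counter that it flushes at rank boundaries, padding or truncating at 64 squares on the fly.
import Mathlib
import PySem

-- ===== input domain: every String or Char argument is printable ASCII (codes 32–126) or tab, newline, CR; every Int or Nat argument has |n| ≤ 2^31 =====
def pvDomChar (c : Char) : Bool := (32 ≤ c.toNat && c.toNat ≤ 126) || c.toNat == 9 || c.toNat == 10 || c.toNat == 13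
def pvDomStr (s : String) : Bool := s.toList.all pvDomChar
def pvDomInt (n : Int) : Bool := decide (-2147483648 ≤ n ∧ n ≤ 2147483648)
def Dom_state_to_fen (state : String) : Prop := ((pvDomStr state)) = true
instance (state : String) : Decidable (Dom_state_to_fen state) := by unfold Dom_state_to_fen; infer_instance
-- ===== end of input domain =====

-- B is an alternative single-pass implementation: it streams the encoding once, emitting board
-- characters directly with a running square index and pending-empties counter, instead of A's
-- decode-into-a-flat-64-square-list followed by an 8×8 re-scan. Equivalence of the return value is
-- proved for every input on which the Python A returns (Pre_ excludes exactly the inputs where A raises).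

-- str(n) for the empty-square counts (both Pythons append str(count))
def pvCount (n : Nat) : List Char := PySem.Int.toChars (n : Int)

-- piece_map.get(c, '?') — the identical dict literal of both Pythons
def pieceA (c : Char) : Char :=
  (PySem.Dict.ofList [('A','P'),('B','N'),('C','B'),('D','R'),('E','Q'),('F','K'),
                      ('G','p'),('H','n'),('I','b'),('J','r'),('K','q'),('L','k')]).getD c '?'

-- ===== PORT A =====
-- body of A's inner `for file` loop; state = (rank_str, empty_count)
def innerStepA (st : List Char × Nat) (piece : Option Char) : List Char × Nat :=
  match piece with
  | none => (st.1, st.2 + 1)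
  | some p => ((if st.2 > 0 then st.1 ++ pvCount st.2 else st.1) ++ [p], 0)

-- A's `while i < len(encoding)` decoding loop
def decodeA (encoding : List Char) : List (Option Char) :=
  encoding.foldl (fun squares c =>
    if PySem.Chars.isdigit c then squares ++ List.replicate (c.toNat - 48) (none : Option Char)
    else squares ++ [some (pieceA c)]) []

-- A's inner `for file` loop plus the trailing flush; index is ≥ 0 so
-- `squares[i] if i < len(squares) else None` is List.getD
def rankStrA (squares : List (Option Char)) (rank : Nat) : List Char :=
  let st := (List.range 8).foldl
    (fun st file => innerStepA st (squares.getD (rank * 8 + file) none)) ([], 0)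
  if st.2 > 0 then st.1 ++ pvCount st.2 else st.1

-- A's outer `for rank` loop building fen_parts, then '/'.join
def boardA (squares : List (Option Char)) : List Char :=
  PySem.Chars.join ['/'] ((List.range 8).foldl (fun parts rank => parts ++ [rankStrA squares rank]) [])

def state_to_fen (state : String) : String :=
  if state = "start[w]" then "rnbqkbnr/pppppppp/8/8/8/8/PPPPPPPP/RNBQKBNR w KQkq - 0 1"
  else
    let cs := state.toList
    let bracket_index := PySem.Chars.find cs ['[']        -- state.index('['); absent '[' (ValueError) excluded by Pre_
    let encoding := PySem.List.slice cs none (some bracket_index)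
    match PySem.List.pyGet? cs (bracket_index + 1) with   -- state[bracket_index+1]
    | none => ""                                          -- IndexError; excluded by Pre_
    | some turn =>
      String.ofList (boardA (decodeA encoding) ++ [' ', if turn = 'w' then 'w' else 'b'] ++ (" - - 0 1").toList)

-- ===== PORT B =====
-- Source B's emit(piece): no-op past square 64; flush-and-append or count an empty; at a rank
-- boundary flush pending empties and add '/' unless the board is complete
def pvEmit (st : List Char × Nat × Nat) (piece : Option Char) : List Char × Nat × Nat :=
  if 64 ≤ st.2.1 then st
  else
    let c : List Char × Nat :=
      match piece with
      | none => (st.1, st.2.2 + 1)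
      | some p => ((if st.2.2 > 0 then st.1 ++ pvCount st.2.2 else st.1) ++ [p], 0)
    let sq := st.2.1 + 1
    if sq % 8 = 0 then
      ((if c.2 > 0 then c.1 ++ pvCount c.2 else c.1) ++ (if sq < 64 then ['/'] else []), sq, 0)
    else
      (c.1, sq, c.2)

-- termination of Source B's `while sq < 64` padding loop: emit(None) advances sq
theorem pvEmit_none_sq (st : List Char × Nat × Nat) (h : st.2.1 < 64) :
    (pvEmit st none).2.1 = st.2.1 + 1 := by
  unfold pvEmit
  rw [if_neg (by omega)]
  dsimp only
  split <;> rfl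

-- Source B's `while sq < 64: emit(None)` padding loop
def pvPad (st : List Char × Nat × Nat) : List Char × Nat × Nat :=
  if h : st.2.1 < 64 then pvPad (pvEmit st none) else st
termination_by 64 - st.2.1
decreasing_by rw [pvEmit_none_sq st h]; omega

-- Source B's `for ch in encoding` loop
def runB (st : List Char × Nat × Nat) (encoding : List Char) : List Char × Nat × Nat :=
  encoding.foldl (fun st c =>
    if PySem.Chars.isdigit c then
      (List.range (c.toNat - 48)).foldl (fun st _ => pvEmit st none) st
    else pvEmit st (some (pieceA c))) st

def state_to_fen_alt (state : String) : String :=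
  if state = "start[w]" then "rnbqkbnr/pppppppp/8/8/8/8/PPPPPPPP/RNBQKBNR w KQkq - 0 1"
  else
    let cs := state.toList
    let bracket_index := PySem.Chars.find cs ['[']        -- same verbatim parsing as A (and as Source B)
    let encoding := PySem.List.slice cs none (some bracket_index)
    match PySem.List.pyGet? cs (bracket_index + 1) with
    | none => ""                                          -- IndexError; excluded by Pre_
    | some turn =>
      String.ofList ((pvPad (runB ([], 0, 0) encoding)).1 ++ [' ', if turn = 'w' then 'w' else 'b'] ++ (" - - 0 1").toList)

-- ===== PRECONDITION & SPEC =====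
-- Excludes exactly the inputs where A raises: no '[' in state (ValueError from state.index('['))
-- or '[' occurring only as the last character (IndexError from state[bracket_index+1]).
-- B raises identically there.
def Pre_state_to_fen (state : String) : Prop :=
  0 ≤ PySem.Chars.find state.toList ['['] ∧
  PySem.Chars.find state.toList ['['] + 2 ≤ (state.toList.length : Int)
instance (state : String) : Decidable (Pre_state_to_fen state) := by unfold Pre_state_to_fen; infer_instance

def pvWitness_state_to_fen : String := "4ABC1[b]"

def Spec_state_to_fen (state : String) (out : String) : Prop := out = state_to_fen_alt state
instance (state : String) (out : String) : Decidable (Spec_state_to_fen state out) := by unfold Spec_state_to_fen; infer_instance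

-- ===== CLAIM (what is proved, stated in full; the proofs are below) =====
def Claim_equal_state_to_fen : Prop := ∀ (state : String), Dom_state_to_fen state → Pre_state_to_fen state → Spec_state_to_fen state (state_to_fen state)

-- ===== LEMMAS AND PROOFS =====

-- the board cells contributed by one encoding character
def cellsOf (c : Char) : List (Option Char) :=
  if PySem.Chars.isdigit c then List.replicate (c.toNat - 48) none else [some (pieceA c)]

def pvDecode (enc : List Char) : List (Option Char) := enc.flatMap cellsOf

def finishRank (st : List Char × Nat) : List Char :=
  if st.2 > 0 then st.1 ++ pvCount st.2 else st.1

def rankOf (cells : List (Option Char)) : List Char := finishRank (cells.foldl innerStepA ([], 0))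

def renderRanks : Nat → List (Option Char) → List Char
  | 0, _ => []
  | m+1, L => rankOf (L.take 8) ++ (if 0 < m then ['/'] else []) ++ renderRanks m (L.drop 8)

-- the 64 squares the ranks are rendered from: decode output truncated to 64 and padded with empties
def pvCells64 (s : List (Option Char)) : List (Option Char) :=
  s.take 64 ++ List.replicate (64 - s.length) none

theorem decodeA_eq (enc : List Char) : decodeA enc = pvDecode enc := by
  unfold decodeA pvDecode
  rw [show (fun (squares : List (Option Char)) c =>
      if PySem.Chars.isdigit c then squares ++ List.replicate (c.toNat - 48) (none : Option Char)
      else squares ++ [some (pieceA c)]) = fun squares c => squares ++ cellsOf c by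
    funext s c; unfold cellsOf; split <;> rfl]
  rw [PySem.List.foldl_append_eq_flatMap]
  rfl

theorem range_fold_emit (n : Nat) (st : List Char × Nat × Nat) :
    (List.range n).foldl (fun st _ => pvEmit st none) st =
      (List.replicate n (none : Option Char)).foldl pvEmit st := by
  induction n with
  | zero => rfl
  | succ m ih =>
    rw [List.range_succ, List.replicate_succ', List.foldl_append, List.foldl_append, ih]
    rfl

theorem runB_eq (enc : List Char) : ∀ st, runB st enc = (pvDecode enc).foldl pvEmit st := by
  induction enc with
  | nil => intro st; rfl
  | cons c t ih =>
    intro st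
    unfold runB pvDecode at *
    rw [List.foldl_cons, List.flatMap_cons, List.foldl_append]
    by_cases hd : PySem.Chars.isdigit c
    · rw [ih]; unfold cellsOf; rw [if_pos hd, if_pos hd, range_fold_emit]
    · rw [ih]; unfold cellsOf; rw [if_neg hd, if_neg hd]; rfl

theorem pvEmit_frozen (st : List Char × Nat × Nat) (p : Option Char) (h : 64 ≤ st.2.1) :
    pvEmit st p = st := by
  unfold pvEmit; rw [if_pos h]

theorem foldl_emit_frozen (l : List (Option Char)) (st : List Char × Nat × Nat) (h : 64 ≤ st.2.1) :
    l.foldl pvEmit st = st := by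
  induction l with
  | nil => rfl
  | cons c t ih => rw [List.foldl_cons, pvEmit_frozen st c h, ih]

theorem pvEmit_sq (st : List Char × Nat × Nat) (p : Option Char) (h : st.2.1 < 64) :
    (pvEmit st p).2.1 = st.2.1 + 1 := by
  unfold pvEmit
  rw [if_neg (by omega)]
  dsimp only
  split <;> rfl

theorem foldl_emit_sq (l : List (Option Char)) : ∀ (st : List Char × Nat × Nat), st.2.1 ≤ 64 →
    (l.foldl pvEmit st).2.1 = min 64 (st.2.1 + l.length) := by
  induction l with
  | nil => intro st h; simp; omega
  | cons c t ih =>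
    intro st h
    rw [List.foldl_cons]
    by_cases hlt : st.2.1 < 64
    · rw [ih _ (by rw [pvEmit_sq st c hlt]; omega), pvEmit_sq st c hlt]
      simp [List.length_cons]; omega
    · rw [pvEmit_frozen st c (by omega), ih st h]
      simp [List.length_cons]; omega

theorem pvPad_eq (st : List Char × Nat × Nat) :
    pvPad st = (List.replicate (64 - st.2.1) (none : Option Char)).foldl pvEmit st := by
  by_cases h : st.2.1 < 64
  · rw [pvPad, dif_pos h]
    rw [pvPad_eq (pvEmit st none)]
    rw [show (64 - st.2.1) = (64 - (pvEmit st none).2.1) + 1 by rw [pvEmit_none_sq st h]; omega]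
    rw [List.replicate_succ, List.foldl_cons]
  · rw [pvPad, dif_neg h]
    rw [show (64 - st.2.1) = 0 by omega]
    rfl
termination_by 64 - st.2.1
decreasing_by rw [pvEmit_none_sq st h]; omega

-- the streaming emit agrees with A's per-rank state machine inside one rank
theorem stream_rank (cells : List (Option Char)) : ∀ (r i : Nat) (out rs : List Char) (e : Nat),
    r < 8 → i + cells.length = 8 → cells ≠ [] →
    cells.foldl pvEmit (out ++ rs, 8*r + i, e) =
      (out ++ finishRank (cells.foldl innerStepA (rs, e)) ++ (if r < 7 then ['/'] else []),
       8*(r+1), 0) := by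
  induction cells with
  | nil => intro _ _ _ _ _ _ _ h; exact absurd rfl h
  | cons c t ih =>
    intro r i out rs e hr hlen _
    have hi : i ≤ 7 := by simp [List.length_cons] at hlen; omega
    have hsq : 8 * r + i < 64 := by omega
    rw [List.foldl_cons, List.foldl_cons]
    by_cases ht : t = []
    · subst ht
      have hi7 : i = 7 := by simp [List.length_cons] at hlen; omega
      subst hi7
      have hmod : (8 * r + 7 + 1) % 8 = 0 := by omega
      have h8 : 8 * r + 7 + 1 = 8 * (r + 1) := by ring
      have hlt : (8 * (r + 1) < 64) ↔ (r < 7) := by omega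
      cases c with
      | none =>
        unfold pvEmit innerStepA finishRank
        rw [if_neg (by dsimp only; omega)]
        dsimp only [List.foldl_nil]
        rw [if_pos hmod]
        simp only [h8, hlt]
        simp [List.append_assoc]
      | some p =>
        unfold pvEmit innerStepA finishRank
        rw [if_neg (by dsimp only; omega)]
        dsimp only [List.foldl_nil]
        rw [if_pos hmod]
        simp only [h8, hlt]
        split_ifs <;> simp [List.append_assoc]
    · have hi6 : i ≤ 6 := by
        rcases t with _ | ⟨x, t2⟩
        · exact absurd rfl ht
        · simp [List.length_cons] at hlen; omega
      have hmod : ¬((8 * r + i + 1) % 8 = 0) := by omega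
      have step : pvEmit (out ++ rs, 8 * r + i, e) c =
          (out ++ (innerStepA (rs, e) c).1, 8 * r + (i + 1), (innerStepA (rs, e) c).2) := by
        cases c with
        | none =>
          unfold pvEmit innerStepA
          rw [if_neg (by dsimp only; omega)]
          dsimp only
          rw [if_neg hmod]
          rfl
        | some p =>
          unfold pvEmit innerStepA
          rw [if_neg (by dsimp only; omega)]
          dsimp only
          rw [if_neg hmod]
          split_ifs <;> simp [List.append_assoc] <;> omega
      rw [step]
      exact ih r (i + 1) out (innerStepA (rs, e) c).1 (innerStepA (rs, e) c).2 hr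
        (by simp [List.length_cons] at hlen; omega) ht

-- eight-rank version: streaming m remaining ranks renders them with separators
theorem stream_ranks : ∀ (m : Nat) (L : List (Option Char)) (out : List Char),
    m ≤ 8 → L.length = 8 * m →
    L.foldl pvEmit (out, 8*(8-m), 0) = (out ++ renderRanks m L, 64, 0) := by
  intro m
  induction m with
  | zero =>
    intro L out _ hL
    rw [List.length_eq_zero_iff.mp hL]
    simp [renderRanks]
  | succ m ih =>
    intro L out hm hL
    have h8 : (L.take 8).length = 8 := by simp [List.length_take]; omega
    rw [← List.take_append_drop 8 L, List.foldl_append]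
    rw [List.take_append_drop]
    have := stream_rank (L.take 8) (8 - (m+1)) 0 out [] 0 (by omega) (by omega)
      (by intro hc; rw [hc] at h8; simp at h8)
    simp only [Nat.add_zero, List.append_nil] at this
    rw [this]
    rw [show 8 - (m+1) + 1 = 8 - m by omega]
    rw [ih (L.drop 8) _ (by omega) (by simp [List.length_drop]; omega)]
    rw [show renderRanks (m+1) L = rankOf (L.take 8) ++ (if 0 < m then ['/'] else []) ++ renderRanks m (L.drop 8) from rfl]
    have hsep : (if 8 - (m+1) < 7 then ['/'] else []) = (if 0 < m then ['/'] else []) := by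
      split <;> split <;> first | rfl | omega
    rw [hsep]
    unfold rankOf
    simp [List.append_assoc]

theorem length_cells64 (s : List (Option Char)) : (pvCells64 s).length = 64 := by
  simp [pvCells64, List.length_take, List.length_replicate]; omega

theorem cells64_getElem? (s : List (Option Char)) (i : Nat) (h : i < 64) :
    (pvCells64 s)[i]? = some (s.getD i none) := by
  unfold pvCells64
  by_cases hi : i < s.length
  · rw [List.getElem?_append_left (by simp [List.length_take]; omega)]
    rw [List.getElem?_take, if_pos h, List.getD_eq_getElem?_getD, List.getElem?_eq_getElem hi]
    rfl
  · rw [List.getElem?_append_right (by simp [List.length_take]; omega)]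
    rw [List.getElem?_replicate, if_pos (by simp [List.length_take]; omega)]
    rw [List.getD_eq_getElem?_getD, List.getElem?_eq_none (by omega)]
    rfl

theorem chunk_eq (s : List (Option Char)) (r : Nat) (hr : r < 8) :
    ((pvCells64 s).drop (8*r)).take 8 =
      (List.range 8).map (fun f => s.getD (r * 8 + f) none) := by
  apply List.ext_getElem?
  intro i
  by_cases hi : i < 8
  · rw [List.getElem?_take, if_pos hi, List.getElem?_drop]
    rw [cells64_getElem? s (8*r + i) (by omega)]
    rw [List.getElem?_map, List.getElem?_range hi]
    simp [show 8*r + i = r*8 + i by ring]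
  · rw [List.getElem?_take, if_neg hi, List.getElem?_map,
        List.getElem?_eq_none (by simp [List.length_range]; omega)]
    rfl

theorem rank_eq (s : List (Option Char)) (r : Nat) (hr : r < 8) :
    rankStrA s r = rankOf (((pvCells64 s).drop (8*r)).take 8) := by
  rw [chunk_eq s r hr]
  unfold rankOf rankStrA finishRank
  rw [List.foldl_map]

theorem boardA_eq (s : List (Option Char)) : boardA s = renderRanks 8 (pvCells64 s) := by
  unfold boardA
  rw [PySem.List.foldl_append_singleton_eq_map]
  rw [show (List.range 8) = [0,1,2,3,4,5,6,7] by rfl]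
  simp only [List.map_cons, List.map_nil, List.nil_append]
  rw [rank_eq s 0 (by omega), rank_eq s 1 (by omega), rank_eq s 2 (by omega), rank_eq s 3 (by omega),
      rank_eq s 4 (by omega), rank_eq s 5 (by omega), rank_eq s 6 (by omega), rank_eq s 7 (by omega)]
  rw [show renderRanks 8 (pvCells64 s) =
    rankOf ((pvCells64 s).take 8) ++ ['/'] ++
    (rankOf (((pvCells64 s).drop 8).take 8) ++ ['/'] ++
    (rankOf ((((pvCells64 s).drop 8).drop 8).take 8) ++ ['/'] ++
    (rankOf (((((pvCells64 s).drop 8).drop 8).drop 8).take 8) ++ ['/'] ++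
    (rankOf ((((((pvCells64 s).drop 8).drop 8).drop 8).drop 8).take 8) ++ ['/'] ++
    (rankOf (((((((pvCells64 s).drop 8).drop 8).drop 8).drop 8).drop 8).take 8) ++ ['/'] ++
    (rankOf ((((((((pvCells64 s).drop 8).drop 8).drop 8).drop 8).drop 8).drop 8).take 8) ++ ['/'] ++
    (rankOf (((((((((pvCells64 s).drop 8).drop 8).drop 8).drop 8).drop 8).drop 8).drop 8).take 8) ++ [] ++ [])))))))
    from rfl]
  simp only [List.drop_drop]
  norm_num [PySem.Chars.join, List.intercalate, List.intersperse, List.append_assoc]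

theorem boardB_eq (cells : List (Option Char)) :
    pvPad (cells.foldl pvEmit ([], 0, 0)) = (renderRanks 8 (pvCells64 cells), 64, 0) := by
  have hM := stream_ranks 8 (pvCells64 cells) [] (by omega) (by rw [length_cells64])
  simp only [Nat.sub_self, Nat.mul_zero, List.nil_append] at hM
  rw [pvPad_eq, foldl_emit_sq cells ([], 0, 0) (by dsimp only; omega)]
  dsimp only
  rw [Nat.zero_add]
  by_cases hlen : cells.length ≤ 64
  · rw [Nat.min_eq_right hlen, ← List.foldl_append]
    have hcp : cells ++ List.replicate (64 - cells.length) (none : Option Char) = pvCells64 cells := by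
      unfold pvCells64; rw [List.take_of_length_le hlen]
    rw [hcp, hM]
  · rw [Nat.min_eq_left (by omega), Nat.sub_self, List.replicate_zero, List.foldl_nil]
    have hc : pvCells64 cells = cells.take 64 := by
      unfold pvCells64
      rw [show 64 - cells.length = 0 by omega, List.replicate_zero, List.append_nil]
    have hfreeze : cells.foldl pvEmit ([], 0, 0) = (cells.take 64).foldl pvEmit ([], 0, 0) := by
      conv_lhs => rw [← List.take_append_drop 64 cells]
      rw [List.foldl_append]
      exact foldl_emit_frozen _ _ (by
        rw [foldl_emit_sq _ _ (by dsimp only; omega)]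
        simp [List.length_take]; omega)
    rw [hfreeze, ← hc, hM]

theorem board_main (enc : List Char) :
    boardA (decodeA enc) = (pvPad (runB ([], 0, 0) enc)).1 := by
  rw [runB_eq, decodeA_eq, boardA_eq, boardB_eq]

-- ===== VERDICT (by name: the statement is the Claim_ definition above) =====
theorem state_to_fen_spec : Claim_equal_state_to_fen := by
  intro state _ _
  unfold Spec_state_to_fen state_to_fen state_to_fen_alt
  split
  · rfl
  · dsimp only
    cases PySem.List.pyGet? state.toList (PySem.Chars.find state.toList ['['] + 1) with
    | none => rfl
    | some turn => rw [board_main]
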